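-- pv_equiv track=rewrite | github.com/susreepatro18/PYTHON-PROGRAMS | QUES 3.py | highest_votes
-- ===== SOURCE A (Python) =====
-- def highest_votes(votes):
--     # Initialize vote counters for each candidate
--     a = 0
--     b = 0
--     c = 0
--
--     # Determine the number of votes
--     n = len(votes)
--
--     # Iterate over each vote and count the votes for each candidate
--     for i in range(n):
--         if votes[i] == "a":
--             a += 1
--         elif votes[i] == "b":
--             b += 1
--         elif votes[i] == "c":
--             c += 1
--
--     # Determine the winner based on the vote counts
--     if a > b and a > c:
--         return "A won"
--     elif b > c and b > a:
--         return "B won"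
--     elif c > b and c > a:
--         return "C won"
--     else:
--         return "It's a tie"
-- ===== SOURCE B (Python) =====
-- def highest_votes(votes):
--     counts = [(votes.count(ch), ch) for ch in "abc"]
--     m = max(n for n, _ in counts)
--     winners = [ch for n, ch in counts if n == m]
--     if len(winners) == 1:
--         return winners[0].upper() + " won"
--     return "It's a tie"
-- ===== Notes on version B (the rewrite author's own statement) =====
-- stated objective: simpler
-- what changed: Replaces the manual three-counter loop and three pairwise comparisons with per-candidate counts and a max-plus-unique-argmax selection: the winner exists iff exactly one candidate attains the maximum count.
import Mathlib
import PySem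

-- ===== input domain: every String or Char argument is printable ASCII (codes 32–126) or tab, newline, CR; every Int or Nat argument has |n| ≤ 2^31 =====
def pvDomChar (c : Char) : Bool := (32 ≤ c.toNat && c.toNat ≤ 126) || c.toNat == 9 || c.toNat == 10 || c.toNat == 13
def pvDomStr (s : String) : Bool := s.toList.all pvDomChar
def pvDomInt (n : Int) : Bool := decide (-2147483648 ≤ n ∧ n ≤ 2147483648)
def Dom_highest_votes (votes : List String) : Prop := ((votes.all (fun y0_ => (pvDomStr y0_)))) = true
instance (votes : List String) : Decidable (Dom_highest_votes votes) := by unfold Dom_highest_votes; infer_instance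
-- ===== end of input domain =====

-- B replaces A's three hand-kept counters and pairwise comparisons with per-candidate counts
-- and a max-plus-unique-argmax selection (objective: simpler).

-- ===== PORT A =====
def highest_votes (votes : List String) : String :=
  let st : Int × Int × Int :=
    (PySem.List.pyRange 0 (PySem.List.len votes) 1).foldl
      (fun (st : Int × Int × Int) i =>
        let v := PySem.List.pyGetD votes i ""
        if v = "a" then (st.1 + 1, st.2.1, st.2.2)
        else if v = "b" then (st.1, st.2.1 + 1, st.2.2)
        else if v = "c" then (st.1, st.2.1, st.2.2 + 1)
        else st)
      (0, 0, 0)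
  if st.1 > st.2.1 ∧ st.1 > st.2.2 then "A won"
  else if st.2.1 > st.2.2 ∧ st.2.1 > st.1 then "B won"
  else if st.2.2 > st.2.1 ∧ st.2.2 > st.1 then "C won"
  else "It's a tie"

-- ===== PORT B =====
def highest_votes_alt (votes : List String) : String :=
  let counts : List (Int × String) :=
    ["a", "b", "c"].map (fun ch => ((PySem.List.count votes ch : Int), ch))
  match PySem.List.max? (counts.map (fun p => p.1)) (fun x => x) with
  | none => "It's a tie"   -- unreachable: counts is a 3-element list (Python's max would raise only on empty)
  | some m =>
    let winners := (counts.filter (fun p => p.1 == m)).map (fun p => p.2)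
    if winners.length = 1 then PySem.Str.upper (winners.getD 0 "") ++ " won"
    else "It's a tie"

-- ===== PRECONDITION & SPEC =====
def Spec_highest_votes (votes : List String) (out : String) : Prop := out = highest_votes_alt votes
instance (votes : List String) (out : String) : Decidable (Spec_highest_votes votes out) := by unfold Spec_highest_votes; infer_instance

-- ===== CLAIM (what is proved, stated in full; the proofs are below) =====
def Claim_equal_highest_votes : Prop := ∀ (votes : List String), Dom_highest_votes votes → Spec_highest_votes votes (highest_votes votes)

-- ===== LEMMAS AND PROOFS =====

-- A's counting loop computes the three counts.
lemma countA (votes : List String) (x y z : Int) :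
    votes.foldl
      (fun (st : Int × Int × Int) v =>
        if v = "a" then (st.1 + 1, st.2.1, st.2.2)
        else if v = "b" then (st.1, st.2.1 + 1, st.2.2)
        else if v = "c" then (st.1, st.2.1, st.2.2 + 1)
        else st)
      (x, y, z)
    = (x + votes.count "a", y + votes.count "b", z + votes.count "c") := by
  induction votes generalizing x y z with
  | nil => simp
  | cons v t ih =>
    by_cases h1 : v = "a"
    · subst h1; simp [ih]; omega
    · by_cases h2 : v = "b"
      · subst h2; simp [h1, ih]; omega
      · by_cases h3 : v = "c"
        · subst h3; simp [h1, h2, ih]; omega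
        · simp [h1, h2, h3, ih]

-- A's index loop, rewritten as the structural fold, computes the three counts
lemma loopA (votes : List String) :
    (PySem.List.pyRange 0 (votes.length : Int) 1).foldl
      (fun (st : Int × Int × Int) i =>
        if PySem.List.pyGetD votes i "" = "a" then (st.1 + 1, st.2.1, st.2.2)
        else if PySem.List.pyGetD votes i "" = "b" then (st.1, st.2.1 + 1, st.2.2)
        else if PySem.List.pyGetD votes i "" = "c" then (st.1, st.2.1, st.2.2 + 1)
        else st)
      (0, 0, 0)
    = ((votes.count "a" : Int), (votes.count "b" : Int), (votes.count "c" : Int)) := by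
  rw [PySem.List.foldl_pyRange_zero_pyGetD' votes ""
        (fun (st : Int × Int × Int) v =>
          if v = "a" then (st.1 + 1, st.2.1, st.2.2)
          else if v = "b" then (st.1, st.2.1 + 1, st.2.2)
          else if v = "c" then (st.1, st.2.1, st.2.2 + 1)
          else st)
        ((0 : Int), (0 : Int), (0 : Int)),
      countA]
  simp

-- the selection steps agree, as a statement about the three counts
lemma sel_eq (x y z : Int) :
    (if x > y ∧ x > z then "A won"
     else if y > z ∧ y > x then "B won"
     else if z > y ∧ z > x then "C won"
     else "It's a tie")
    = (let counts : List (Int × String) := [(x, "a"), (y, "b"), (z, "c")]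
       match PySem.List.max? (counts.map (fun p => p.1)) (fun x => x) with
       | none => "It's a tie"
       | some m =>
         let winners := (counts.filter (fun p => p.1 == m)).map (fun p => p.2)
         if winners.length = 1 then PySem.Str.upper (winners.getD 0 "") ++ " won"
         else "It's a tie") := by
  simp only [List.map_cons, List.map_nil, PySem.List.max?_id_cons, List.foldl_cons, List.foldl_nil,
    List.filter_cons, List.filter_nil]
  have hmx : x ≤ max (max x y) z := le_max_of_le_left (le_max_left x y)
  have hmy : y ≤ max (max x y) z := le_max_of_le_left (le_max_right x y)
  have hmz : z ≤ max (max x y) z := le_max_right _ _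
  have hor : max (max x y) z = x ∨ max (max x y) z = y ∨ max (max x y) z = z := by
    rcases max_choice (max x y) z with h | h
    · rcases max_choice x y with h' | h' <;> rw [h, h']
      · exact Or.inl rfl
      · exact Or.inr (Or.inl rfl)
    · exact Or.inr (Or.inr h)
  generalize hM : max (max x y) z = M at hmx hmy hmz hor ⊢
  by_cases h1 : x > y ∧ x > z <;> by_cases h2 : y > z ∧ y > x <;> by_cases h3 : z > y ∧ z > x <;>
    by_cases ha : x = M <;> by_cases hb : y = M <;> by_cases hc : z = M <;>
    simp [h1, h2, h3, ha, hb, hc] <;>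
    first | rfl | decide | omega | (split_ifs <;> first | rfl | decide | omega)

-- ===== VERDICT (by name: the statement is the Claim_ definition above) =====
theorem highest_votes_spec : Claim_equal_highest_votes := by
  intro votes _
  unfold Spec_highest_votes highest_votes highest_votes_alt
  simp only []
  rw [show PySem.List.len votes = (votes.length : Int) from rfl, loopA]
  simpa [PySem.List.count] using sel_eq (votes.count "a") (votes.count "b") (votes.count "c")
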